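-- pv_equiv track=rewrite | github.com/alexsfking/python_exercises | codewars/reverse_sublists_even_numbers.py | rev_sub
-- ===== SOURCE A (Python) =====
-- def rev_sub(arr):
--     rev,out=[],[]
--     for value in arr:
--         if(value%2==0):
--             rev.append(value)
--         else:
--             while(len(rev)):
--                 out.append(rev.pop())
--             out.append(value)
--     while(len(rev)):
--         out.append(rev.pop())
--     return out
-- ===== SOURCE B (Python) =====
-- def rev_sub(arr):
--     # split arr into maximal same-parity runs; emit even runs reversed, odd runs as-is
--     out = []
--     n = len(arr)
--     i = 0
--     while i < n:
--         parity = arr[i] % 2 == 0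
--         j = i + 1
--         while j < n and (arr[j] % 2 == 0) == parity:
--             j += 1
--         run = arr[i:j]
--         out += run[::-1] if parity else run
--         i = j
--     return out
-- ===== Notes on version B (the rewrite author's own statement) =====
-- stated objective: alternative
-- what changed: B splits the input into maximal same-parity runs and emits each run at once (even runs reversed via slicing, odd runs unchanged), replacing A's element-by-element stack push with pop-flush on every odd element.
import Mathlib
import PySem

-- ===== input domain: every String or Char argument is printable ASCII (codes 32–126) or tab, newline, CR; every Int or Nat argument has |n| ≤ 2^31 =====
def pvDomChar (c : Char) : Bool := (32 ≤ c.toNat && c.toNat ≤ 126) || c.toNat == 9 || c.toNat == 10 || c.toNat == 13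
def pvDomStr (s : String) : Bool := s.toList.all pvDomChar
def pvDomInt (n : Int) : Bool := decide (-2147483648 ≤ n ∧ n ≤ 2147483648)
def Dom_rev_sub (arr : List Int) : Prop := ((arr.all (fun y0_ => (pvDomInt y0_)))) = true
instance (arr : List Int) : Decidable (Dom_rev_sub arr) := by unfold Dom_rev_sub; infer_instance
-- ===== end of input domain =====

-- B splits the input into maximal same-parity runs and emits each run at once (even runs
-- reversed), instead of A's element-wise stack push with a pop-flush at each odd element.

-- ===== PORT A =====
-- 'while len(rev): out.append(rev.pop())' — pop from the back of rev, append to out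
def popAll : List Int → List Int → List Int
  | [], out => out
  | r :: rs, out => popAll (r :: rs).dropLast (out ++ [(r :: rs).getLast (by simp)])
termination_by rev _ => rev.length
decreasing_by simp

def aLoop : List Int → List Int → List Int → List Int
  | rev, out, [] => popAll rev out
  | rev, out, v :: vs =>
    if PySem.Int.mod v 2 == 0 then aLoop (rev ++ [v]) out vs
    else aLoop [] (popAll rev out ++ [v]) vs

def rev_sub (arr : List Int) : List Int := aLoop [] [] arr

-- ===== PORT B =====
-- final j of the inner 'while j < n and (arr[j] % 2 == 0) == parity: j += 1'
-- (arr.getD j 0 is arr[j]; the guard j < arr.length keeps the access in range, so it is exact)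
def runTo (arr : List Int) (parity : Bool) (j : Nat) : Nat :=
  if h : j < arr.length ∧ ((PySem.Int.mod (arr.getD j 0) 2 == 0) == parity) = true then
    runTo arr parity (j + 1)
  else j
termination_by arr.length - j
decreasing_by omega

-- termination of the outer loop: the scan index only moves forward (cited by bLoop)
lemma runTo_le (arr : List Int) (p : Bool) (j : Nat) : j ≤ runTo arr p j := by
  have main : ∀ (k j : Nat), arr.length - j ≤ k → j ≤ runTo arr p j := by
    intro k
    induction k with
    | zero =>
      intro j hj
      rw [runTo]
      split
      · omega
      · exact Nat.le_refl j
    | succ k ih =>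
      intro j hj
      rw [runTo]
      split
      · exact Nat.le_trans (Nat.le_succ j) (ih (j + 1) (by omega))
      · exact Nat.le_refl j
  exact main (arr.length - j) j (Nat.le_refl _)

-- outer 'while i < n' loop of B; run = arr[i:j] is PySem.List.slice
def bLoop (arr : List Int) (out : List Int) (i : Nat) : List Int :=
  if _h : i < arr.length then
    let parity := PySem.Int.mod (arr.getD i 0) 2 == 0
    let j := runTo arr parity (i + 1)
    let run := PySem.List.slice arr (some (i : Int)) (some (j : Int))
    bLoop arr (out ++ (if parity then run.reverse else run)) j
  else out
termination_by arr.length - i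
decreasing_by
  have := runTo_le arr (PySem.Int.mod (arr.getD i 0) 2 == 0) (i + 1)
  omega

def rev_sub_alt (arr : List Int) : List Int := bLoop arr [] 0

-- ===== PRECONDITION & SPEC =====
def Spec_rev_sub (arr : List Int) (out : List Int) : Prop := out = rev_sub_alt arr
instance (arr : List Int) (out : List Int) : Decidable (Spec_rev_sub arr out) := by unfold Spec_rev_sub; infer_instance

-- ===== CLAIM (what is proved, stated in full; the proofs are below) =====
def Claim_equal_rev_sub : Prop := ∀ (arr : List Int), Dom_rev_sub arr → Spec_rev_sub arr (rev_sub arr)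

-- ===== LEMMAS AND PROOFS =====

-- proof-side model of B: run-splitting restated directly on the list suffix
def runLen (parity : Bool) : List Int → Nat
  | [] => 0
  | w :: ws => if (PySem.Int.mod w 2 == 0) == parity then runLen parity ws + 1 else 0

def altLoop : List Int → List Int → List Int
  | out, [] => out
  | out, v :: vs =>
    let parity := PySem.Int.mod v 2 == 0
    let k := runLen parity vs + 1
    let run := (v :: vs).take k
    altLoop (out ++ (if parity then run.reverse else run)) ((v :: vs).drop k)
termination_by _ rest => rest.length
decreasing_by simp


lemma popAll_eq (rev : List Int) : ∀ out, popAll rev out = out ++ rev.reverse := by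
  induction rev using List.reverseRecOn with
  | nil => intro out; simp [popAll]
  | append_singleton l a ih =>
    intro out
    have key : popAll (l ++ [a]) out = popAll l (out ++ [a]) := by
      rcases l with _ | ⟨x, xs⟩
      · simp [popAll]
      · show popAll (x :: (xs ++ [a])) out = popAll (x :: xs) (out ++ [a])
        rw [popAll]
        show popAll ((x :: xs) ++ [a]).dropLast
            (out ++ [((x :: xs) ++ [a]).getLast (by simp)]) = popAll (x :: xs) (out ++ [a])
        rw [List.dropLast_concat, List.getLast_concat]
    rw [key, ih]
    simp

-- consuming one odd element equals appending it and continuing on the tail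
lemma altLoop_odd (out : List Int) (v : Int) (vs : List Int)
    (hv : (PySem.Int.mod v 2 == 0) = false) :
    altLoop out (v :: vs) = altLoop (out ++ [v]) vs := by
  rw [altLoop]
  rcases vs with _ | ⟨w, ws⟩
  · simp only [runLen, hv]
    simp
  · by_cases hw : (PySem.Int.mod w 2 == 0) = false
    · conv_rhs => rw [altLoop]
      simp only [runLen, hv, hw]
      simp [List.append_assoc]
    · have hw' : (PySem.Int.mod w 2 == 0) = true := by
        cases h : (PySem.Int.mod w 2 == 0)
        · exact absurd h hw
        · rfl
      simp only [runLen, hv, hw']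
      simp

lemma runLen_true_append (rs vs : List Int)
    (hR : ∀ r ∈ rs, (PySem.Int.mod r 2 == 0) = true)
    (hvs : vs = [] ∨ ∃ w ws, vs = w :: ws ∧ (PySem.Int.mod w 2 == 0) = false) :
    runLen true (rs ++ vs) = rs.length := by
  induction rs with
  | nil =>
    rcases hvs with h | ⟨w, ws, h, hw⟩
    · simp [h, runLen]
    · subst h
      simp only [List.nil_append, runLen, hw]
      simp
  | cons r rs ih =>
    have hr := hR r (by simp)
    have h2 := ih (fun x hx => hR x (by simp [hx]))
    simp only [List.cons_append, runLen, hr, beq_self_eq_true, if_true, h2,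
      List.length_cons]

-- consuming a maximal run of evens R (followed by nothing or an odd head)
lemma altLoop_even_run (out R vs : List Int)
    (hR : ∀ r ∈ R, (PySem.Int.mod r 2 == 0) = true)
    (hvs : vs = [] ∨ ∃ w ws, vs = w :: ws ∧ (PySem.Int.mod w 2 == 0) = false) :
    altLoop out (R ++ vs) = altLoop (out ++ R.reverse) vs := by
  rcases R with _ | ⟨r, rs⟩
  · simp
  · have hr := hR r (by simp)
    rw [show (r :: rs) ++ vs = r :: (rs ++ vs) from rfl, altLoop]
    have hlen : runLen true (rs ++ vs) = rs.length :=
      runLen_true_append rs vs (fun x hx => hR x (by simp [hx])) hvs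
    simp only [hr, if_true, hlen, List.take_succ_cons, List.drop_succ_cons,
      List.take_left, List.drop_left]

lemma aLoop_eq_altLoop (vs : List Int) : ∀ (R out : List Int),
    (∀ r ∈ R, (PySem.Int.mod r 2 == 0) = true) →
    aLoop R out vs = altLoop out (R ++ vs) := by
  induction vs with
  | nil =>
    intro R out hR
    rw [aLoop, popAll_eq, altLoop_even_run out R [] hR (Or.inl rfl), altLoop]
  | cons v vs ih =>
    intro R out hR
    rw [aLoop]
    by_cases hv : (PySem.Int.mod v 2 == 0) = true
    · rw [if_pos (by rw [hv])]
      rw [ih (R ++ [v]) out (by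
        intro r hr
        rcases List.mem_append.mp hr with h | h
        · exact hR r h
        · simp only [List.mem_singleton] at h
          rw [h]; exact hv)]
      simp [List.append_assoc]
    · have hv' : (PySem.Int.mod v 2 == 0) = false := by
        cases h : (PySem.Int.mod v 2 == 0)
        · rfl
        · exact absurd h hv
      rw [if_neg (by rw [hv']; simp)]
      rw [ih [] (popAll R out ++ [v]) (by simp), popAll_eq, List.nil_append,
        altLoop_even_run out R (v :: vs) hR (Or.inr ⟨v, vs, rfl, hv'⟩),
        altLoop_odd (out ++ R.reverse) v vs hv']

lemma runTo_eq (arr : List Int) (p : Bool) : ∀ (k j : Nat), arr.length - j ≤ k →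
    runTo arr p j = j + runLen p (arr.drop j) := by
  intro k
  induction k with
  | zero =>
    intro j hj
    rw [runTo, dif_neg (by omega), List.drop_eq_nil_of_le (by omega)]
    simp [runLen]
  | succ k ih =>
    intro j hj
    rw [runTo]
    split
    · next h =>
      rw [ih (j + 1) (by omega), List.drop_eq_getElem_cons h.1]
      have hg : arr.getD j 0 = arr[j] := List.getD_eq_getElem arr 0 h.1
      rw [runLen, ← hg, h.2]
      simp only [if_true]
      omega
    · next h =>
      by_cases hlt : j < arr.length
      · have hc : ((PySem.Int.mod (arr.getD j 0) 2 == 0) == p) = false := by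
          cases hx : ((PySem.Int.mod (arr.getD j 0) 2 == 0) == p)
          · rfl
          · exact absurd ⟨hlt, hx⟩ h
        rw [List.drop_eq_getElem_cons hlt]
        have hg : arr.getD j 0 = arr[j] := List.getD_eq_getElem arr 0 hlt
        rw [runLen, ← hg, hc]
        simp
      · rw [List.drop_eq_nil_of_le (by omega)]
        simp [runLen]

lemma bLoop_eq_altLoop (arr : List Int) : ∀ (k i : Nat) (out : List Int), arr.length - i ≤ k →
    bLoop arr out i = altLoop out (arr.drop i) := by
  intro k
  induction k with
  | zero =>
    intro i out hi
    rw [bLoop.eq_def, dif_neg (by omega), List.drop_eq_nil_of_le (by omega), altLoop]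
  | succ k ih =>
    intro i out hi
    by_cases h : i < arr.length
    · have hg : arr.getD i 0 = arr[i] := List.getD_eq_getElem arr 0 h
      have hcons : arr.drop i = arr[i] :: arr.drop (i + 1) := List.drop_eq_getElem_cons h
      have hj : runTo arr (PySem.Int.mod arr[i] 2 == 0) (i + 1)
          = (i + 1) + runLen (PySem.Int.mod arr[i] 2 == 0) (arr.drop (i + 1)) :=
        runTo_eq arr _ (arr.length - (i + 1)) (i + 1) (Nat.le_refl _)
      rw [bLoop.eq_def, dif_pos h]
      simp only [hg, hj, PySem.List.slice_natCast]
      rw [show (i + 1) + runLen (PySem.Int.mod arr[i] 2 == 0) (arr.drop (i + 1)) - i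
            = runLen (PySem.Int.mod arr[i] 2 == 0) (arr.drop (i + 1)) + 1 from by omega]
      rw [ih _ _ (by omega)]
      conv_rhs => rw [hcons, altLoop]
      rw [hcons, List.drop_succ_cons, List.drop_drop]
    · rw [bLoop.eq_def, dif_neg h, List.drop_eq_nil_of_le (by omega), altLoop]

-- ===== VERDICT (by name: the statement is the Claim_ definition above) =====
theorem rev_sub_spec : Claim_equal_rev_sub := by
  intro arr _
  show rev_sub arr = rev_sub_alt arr
  rw [rev_sub, rev_sub_alt, aLoop_eq_altLoop arr [] [] (by simp),
    bLoop_eq_altLoop arr arr.length 0 [] (by omega), List.drop_zero, List.nil_append]
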